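-- pv_equiv track=rewrite | github.com/Matheus-Nazario/tudo_sobre_Filas_e_Pilhas_ | tudo_sobre__Pilhas.py | pilha_par_impar
-- ===== SOURCE A (Python) =====
-- def pilha_par_impar(pilha):
--     pilha_par = []
--     pilha_impar = []
--
--     for i in pilha:
--         if i % 2 == 0:
--             pilha_par.append(i)
--         else:
--             pilha_impar.append(i)
--     numPar = sorted(pilha_par, key=int, reverse=True)
--     numImpar = sorted(pilha_impar, key=int, reverse=True)
--     return numPar, numImpar
-- ===== SOURCE B (Python) =====
-- def pilha_par_impar(pilha):
--     # Divide and conquer: recursively split the list in half, get each half's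
--     # (evens, odds) already in descending order, and merge bucket-wise with a
--     # hand-written two-pointer merge.  No library sort, no separate partition pass.
--     def fundir(a, b):  # merge two descending lists into one descending list
--         r = []
--         i = 0
--         j = 0
--         while i < len(a) and j < len(b):
--             if a[i] >= b[j]:
--                 r.append(a[i])
--                 i += 1
--             else:
--                 r.append(b[j])
--                 j += 1
--         r.extend(a[i:])
--         r.extend(b[j:])
--         return r
--
--     def dividir(xs):
--         if len(xs) <= 1:
--             if not xs:
--                 return [], []
--             x = xs[0]
--             return ([x], []) if x % 2 == 0 else ([], [x])
--         m = len(xs) // 2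
--         pe, ie = dividir(xs[:m])
--         pd, io = dividir(xs[m:])
--         return fundir(pe, pd), fundir(ie, io)
--
--     return dividir(pilha)
-- ===== Notes on version B (the rewrite author's own statement) =====
-- stated objective: alternative
-- what changed: B replaces A's partition-then-library-sort-each-bucket with a hand-written divide-and-conquer: it splits the list in half, recursively obtains each half's (even, odd) lists already in descending order, and combines them with its own two-pointer merge, so no library sort and no separate partition pass exist.
import Mathlib
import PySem

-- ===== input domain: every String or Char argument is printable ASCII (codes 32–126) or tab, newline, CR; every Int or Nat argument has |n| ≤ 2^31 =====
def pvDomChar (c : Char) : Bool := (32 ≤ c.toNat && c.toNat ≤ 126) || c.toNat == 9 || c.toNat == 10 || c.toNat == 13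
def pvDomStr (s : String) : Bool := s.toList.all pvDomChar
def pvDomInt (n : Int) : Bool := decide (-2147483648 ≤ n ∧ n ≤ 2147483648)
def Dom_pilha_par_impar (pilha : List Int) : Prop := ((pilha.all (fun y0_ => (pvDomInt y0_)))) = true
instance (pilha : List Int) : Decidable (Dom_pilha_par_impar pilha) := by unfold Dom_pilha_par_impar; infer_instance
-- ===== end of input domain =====

-- B replaces A's partition-then-library-sort with a divide-and-conquer that splits the
-- list in half and merges each half's (even, odd) descending lists with its own merge;
-- same return value.

-- ===== PORT A =====
def pilha_par_impar (pilha : List Int) : List Int × List Int :=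
  let st := pilha.foldl
    (fun (acc : List Int × List Int) i =>
      if PySem.Int.mod i 2 = 0 then (acc.1 ++ [i], acc.2) else (acc.1, acc.2 ++ [i]))
    ([], [])
  (PySem.List.sorted st.1 (fun x => x) true, PySem.List.sorted st.2 (fun x => x) true)

-- ===== PORT B =====
-- 'fundir': the two-pointer while loop of Source B, as the obvious structural recursion
-- consuming the fronts of the two lists (same comparisons, same output order)
def pvFundir (a b : List Int) : List Int :=
  match a, b with
  | [], b => b
  | a, [] => a
  | x :: xs, y :: ys =>
    if x ≥ y then x :: pvFundir xs (y :: ys) else y :: pvFundir (x :: xs) ys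

-- 'dividir': recursion on the halves, exactly as in Source B
def pvDividir (xs : List Int) : List Int × List Int :=
  if h : xs.length ≤ 1 then
    match xs with
    | [] => ([], [])
    | x :: _ => if PySem.Int.mod x 2 = 0 then ([x], []) else ([], [x])
  else
    let m := xs.length / 2
    let l := pvDividir (xs.take m)
    let r := pvDividir (xs.drop m)
    (pvFundir l.1 r.1, pvFundir l.2 r.2)
termination_by xs.length
decreasing_by
  · simp only [List.length_take]; omega
  · simp only [List.length_drop]; omega

def pilha_par_impar_alt (pilha : List Int) : List Int × List Int :=
  pvDividir pilha

-- ===== PRECONDITION & SPEC =====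
def Spec_pilha_par_impar (pilha : List Int) (out : List Int × List Int) : Prop := out = pilha_par_impar_alt pilha
instance (pilha : List Int) (out : List Int × List Int) : Decidable (Spec_pilha_par_impar pilha out) := by unfold Spec_pilha_par_impar; infer_instance

-- ===== CLAIM =====
def Claim_equal_pilha_par_impar : Prop := ∀ (pilha : List Int), Dom_pilha_par_impar pilha → Spec_pilha_par_impar pilha (pilha_par_impar pilha)

-- ===== LEMMAS AND PROOFS =====

-- A's loop computes the two parity filters
theorem pv_loop_filter (xs : List Int) (a b : List Int) :
    xs.foldl
      (fun (acc : List Int × List Int) i =>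
        if PySem.Int.mod i 2 = 0 then (acc.1 ++ [i], acc.2) else (acc.1, acc.2 ++ [i]))
      (a, b)
    = (a ++ xs.filter (fun i => decide (PySem.Int.mod i 2 = 0)),
       b ++ xs.filter (fun i => !decide (PySem.Int.mod i 2 = 0))) := by
  induction xs generalizing a b with
  | nil => simp
  | cons x xs ih =>
    rw [List.foldl_cons, List.filter_cons, List.filter_cons]
    by_cases h : PySem.Int.mod x 2 = 0
    · rw [if_pos h, ih]; simp [(PySem.Int.mod_eq_zero_iff_dvd x 2).mp h]
    · rw [if_neg h, ih]
      have hd : ¬(2:Int) ∣ x := fun hdvd => h ((PySem.Int.mod_eq_zero_iff_dvd x 2).mpr hdvd)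
      have h1 : x % 2 = 1 := by omega
      simp [h1]

theorem pv_fundir_perm (a b : List Int) : (pvFundir a b).Perm (a ++ b) := by
  induction a generalizing b with
  | nil => simp [pvFundir]
  | cons x xs ihx =>
    induction b with
    | nil => simp [pvFundir]
    | cons y ys ihy =>
      rw [pvFundir]
      by_cases h : x ≥ y
      · rw [if_pos h]
        exact (ihx (y :: ys)).cons x
      · rw [if_neg h]
        exact (ihy.cons y).trans List.perm_middle.symm

theorem pv_fundir_pairwise (a b : List Int)
    (ha : a.Pairwise (fun p q => q ≤ p)) (hb : b.Pairwise (fun p q => q ≤ p)) :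
    (pvFundir a b).Pairwise (fun p q => q ≤ p) := by
  induction a generalizing b with
  | nil => simpa [pvFundir] using hb
  | cons x xs ihx =>
    induction b with
    | nil => simpa [pvFundir] using ha
    | cons y ys ihy =>
      rw [pvFundir]
      rcases List.pairwise_cons.mp ha with ⟨hxall, hxs⟩
      rcases List.pairwise_cons.mp hb with ⟨hyall, hys⟩
      by_cases h : x ≥ y
      · rw [if_pos h]
        refine List.pairwise_cons.mpr ⟨?_, ihx (y :: ys) hxs hb⟩
        intro z hz
        have hz' : z ∈ xs ++ y :: ys := (pv_fundir_perm xs (y :: ys)).mem_iff.mp hz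
        rcases List.mem_append.mp hz' with h1 | h1
        · exact hxall z h1
        · rcases List.mem_cons.mp h1 with rfl | h2
          · exact h
          · exact le_trans (hyall z h2) h
      · rw [if_neg h]
        refine List.pairwise_cons.mpr ⟨?_, ihy hys⟩
        intro z hz
        have hz' : z ∈ (x :: xs) ++ ys := (pv_fundir_perm (x :: xs) ys).mem_iff.mp hz
        rcases List.mem_append.mp hz' with h1 | h1
        · rcases List.mem_cons.mp h1 with rfl | h2
          · exact le_of_not_ge h
          · exact le_trans (hxall z h2) (le_of_not_ge h)
        · exact hyall z h1

-- pvDividir's components: a permutation of the parity filter, in weakly descending order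
theorem pv_dividir_spec (xs : List Int) :
    (pvDividir xs).1.Perm (xs.filter (fun i => decide (PySem.Int.mod i 2 = 0)))
    ∧ (pvDividir xs).1.Pairwise (fun p q => q ≤ p)
    ∧ (pvDividir xs).2.Perm (xs.filter (fun i => !decide (PySem.Int.mod i 2 = 0)))
    ∧ (pvDividir xs).2.Pairwise (fun p q => q ≤ p) := by
  induction hn : xs.length using Nat.strong_induction_on generalizing xs with
  | _ n ih =>
  rw [pvDividir]
  by_cases h : xs.length ≤ 1
  · rw [dif_pos h]
    match xs with
    | [] => simp
    | [x] =>
      by_cases hx : PySem.Int.mod x 2 = 0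
      · have hd := (PySem.Int.mod_eq_zero_iff_dvd x 2).mp hx
        simp [hd]
      · have hd : ¬(2:Int) ∣ x := fun hdvd => hx ((PySem.Int.mod_eq_zero_iff_dvd x 2).mpr hdvd)
        have h1 : x % 2 = 1 := by omega
        simp [hd, h1]
    | x :: y :: t => simp at h
  · rw [dif_neg h]
    subst hn
    have h2 : 2 ≤ xs.length := by omega
    have hm1 : (xs.take (xs.length / 2)).length < xs.length := by
      simp only [List.length_take]; omega
    have hm2 : (xs.drop (xs.length / 2)).length < xs.length := by
      simp only [List.length_drop]; omega
    obtain ⟨l1p, l1w, l2p, l2w⟩ := ih _ hm1 (xs.take (xs.length / 2)) rfl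
    obtain ⟨r1p, r1w, r2p, r2w⟩ := ih _ hm2 (xs.drop (xs.length / 2)) rfl
    have hsplit : xs = xs.take (xs.length / 2) ++ xs.drop (xs.length / 2) :=
      (List.take_append_drop _ _).symm
    refine ⟨?_, pv_fundir_pairwise _ _ l1w r1w, ?_, pv_fundir_pairwise _ _ l2w r2w⟩
    · refine (pv_fundir_perm _ _).trans ?_
      refine (l1p.append r1p).trans ?_
      rw [← List.filter_append, ← hsplit]
    · refine (pv_fundir_perm _ _).trans ?_
      refine (l2p.append r2p).trans ?_
      rw [← List.filter_append, ← hsplit]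

-- two weakly descending lists that are permutations of each other are equal
theorem pv_desc_unique {l1 l2 : List Int} (hperm : l1.Perm l2)
    (h1 : l1.Pairwise (fun p q => q ≤ p)) (h2 : l2.Pairwise (fun p q => q ≤ p)) :
    l1 = l2 :=
  hperm.eq_of_pairwise (fun _ _ _ _ hab hba => le_antisymm hba hab) h1 h2

-- ===== VERDICT =====
theorem pilha_par_impar_spec : Claim_equal_pilha_par_impar := by
  intro pilha _
  unfold Spec_pilha_par_impar pilha_par_impar pilha_par_impar_alt
  rw [pv_loop_filter]
  simp only [List.nil_append]
  obtain ⟨b1p, b1w, b2p, b2w⟩ := pv_dividir_spec pilha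
  have a1w := PySem.List.sorted_pairwise_rev
    (pilha.filter (fun i => decide (PySem.Int.mod i 2 = 0))) (fun x : Int => x)
  have a2w := PySem.List.sorted_pairwise_rev
    (pilha.filter (fun i => !decide (PySem.Int.mod i 2 = 0))) (fun x : Int => x)
  have a1p := PySem.List.sorted_perm
    (pilha.filter (fun i => decide (PySem.Int.mod i 2 = 0))) (fun x : Int => x) true
  have a2p := PySem.List.sorted_perm
    (pilha.filter (fun i => !decide (PySem.Int.mod i 2 = 0))) (fun x : Int => x) true
  refine Prod.ext ?_ ?_
  · exact pv_desc_unique (a1p.trans b1p.symm) a1w b1w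
  · exact pv_desc_unique (a2p.trans b2p.symm) a2w b2w
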